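-- pv_equiv track=rewrite | github.com/abelkent/Daily-coding-challenge | 2023/3. March/01.03.2023 - Duplicator locator.py | duplicator_locator_stack
-- ===== SOURCE A (Python) =====
-- def duplicator_locator_stack(array):
--     stack = list()
--     for element in array:
--         if element not in stack:
--             stack.append(element)
--         else:
--             stack.remove(element)
--
--     return stack
-- ===== SOURCE B (Python) =====
-- def duplicator_locator_stack(array):
--     # Two-pass parity filter: keep each element whose total count is odd,
--     # emitted at its last occurrence (which is the order A's toggle stack yields).
--     out = []
--     for i, e in enumerate(array):
--         if array.count(e) % 2 == 1 and e not in array[i + 1:]: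
--             out.append(e)
--     return out
-- ===== Notes on version B (the rewrite author's own statement) =====
-- stated objective: alternative
-- what changed: B replaces A's toggle-stack (append/remove per element) with a stateless two-pass parity filter: it emits an element at its last occurrence whenever its total occurrence count is odd.
import Mathlib
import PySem

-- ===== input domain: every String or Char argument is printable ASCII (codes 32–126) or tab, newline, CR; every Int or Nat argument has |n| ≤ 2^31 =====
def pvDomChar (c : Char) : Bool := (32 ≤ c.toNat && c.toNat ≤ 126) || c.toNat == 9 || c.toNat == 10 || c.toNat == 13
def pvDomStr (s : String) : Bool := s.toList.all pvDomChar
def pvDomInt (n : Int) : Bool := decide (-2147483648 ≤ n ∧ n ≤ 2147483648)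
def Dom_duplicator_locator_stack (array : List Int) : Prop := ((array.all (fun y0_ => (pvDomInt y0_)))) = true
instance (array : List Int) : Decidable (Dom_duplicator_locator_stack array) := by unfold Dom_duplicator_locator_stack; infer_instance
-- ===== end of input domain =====

-- B replaces A's toggle-stack with a two-pass parity filter (keep an element at its
-- last occurrence iff its total count is odd); alternative decomposition, same cost.


-- ===== PORT A =====
def duplicator_locator_stack (array : List Int) : List Int :=
  array.foldl
    (fun stack element =>
      if element ∉ stack then stack ++ [element]
      else (PySem.List.remove? stack element).getD stack)   -- guard `element ∈ stack` makes remove? a some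
    []

-- ===== PORT B =====
-- the loop-body condition of Source B: array.count(e) % 2 == 1 and e not in array[i+1:]
def pvCondB (array : List Int) (p : Int × Int) : Bool :=
  (PySem.Int.mod (PySem.List.count array p.2 : Int) 2 == 1) &&
  !((PySem.List.slice array (some (p.1 + 1)) none).contains p.2)

def duplicator_locator_stack_alt (array : List Int) : List Int :=
  (PySem.List.enumerate array).foldl
    (fun out p => if pvCondB array p then out ++ [p.2] else out)
    []

-- ===== PRECONDITION & SPEC =====
def Spec_duplicator_locator_stack (array : List Int) (out : List Int) : Prop := out = duplicator_locator_stack_alt array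
instance (array : List Int) (out : List Int) : Decidable (Spec_duplicator_locator_stack array out) := by unfold Spec_duplicator_locator_stack; infer_instance

-- ===== CLAIM (what is proved, stated in full; the proofs are below) =====
def Claim_equal_duplicator_locator_stack : Prop := ∀ (array : List Int), Dom_duplicator_locator_stack array → Spec_duplicator_locator_stack array (duplicator_locator_stack array)

-- ===== LEMMAS AND PROOFS =====

-- canonical form of B's output: survivors of the parity filter, in last-occurrence order
def pvF (a : List Int) : List Int :=
  ((PySem.List.enumerate a).filter (pvCondB a)).map Prod.snd

lemma pvAlt_eq_pvF (a : List Int) : duplicator_locator_stack_alt a = pvF a := by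
  unfold duplicator_locator_stack_alt pvF
  rw [PySem.List.foldl_append_if (pvCondB a) Prod.snd (PySem.List.enumerate a) []]
  simp

-- drop of an append below the split point (used to relate drops of a ++ [x] to drops of a)
lemma pvDropAppend {α : Type} (l1 l2 : List α) (n : Nat) (hn : n ≤ l1.length) :
    (l1 ++ l2).drop n = l1.drop n ++ l2 := by
  induction l1 generalizing n with
  | nil => simp_all
  | cons a l ih =>
    cases n with
    | zero => simp
    | succ m => simpa using ih m (by simpa using hn)

lemma pvCondB_eq (a : List Int) (k : Nat) (e : Int) :
    pvCondB a ((k : Int), e) = decide (List.count e a % 2 = 1 ∧ e ∉ a.drop (k + 1)) := by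
  have h1 : ((k : Int) + 1) = ((k + 1 : Nat) : Int) := by push_cast; ring
  have h2 : (PySem.Int.mod ((List.count e a : Nat) : Int) 2 == 1) = decide (List.count e a % 2 = 1) := by
    have hm : PySem.Int.mod ((List.count e a : Nat) : Int) 2 = ((List.count e a % 2 : Nat) : Int) := by
      exact_mod_cast PySem.Int.mod_natCast (List.count e a) 2
    rw [hm]
    by_cases hc : List.count e a % 2 = 1
    · simp [hc]
    · simp [hc]
      omega
  simp only [pvCondB, PySem.List.count_eq, h1, PySem.List.slice_from_natCast, h2,
             List.contains_eq_mem]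
  by_cases hc : List.count e a % 2 = 1 <;> by_cases hm : e ∈ a.drop (k + 1) <;> simp [hc, hm]

lemma pvF_step (a : List Int) (x : Int) :
    pvF (a ++ [x]) =
      (pvF a).filter (fun y => y != x) ++ (if List.count x a % 2 = 0 then [x] else []) := by
  unfold pvF
  rw [show PySem.List.enumerate (a ++ [x]) = PySem.List.enumerate (a ++ [x]) 0 from rfl,
      PySem.List.enumerate_append]
  rw [List.filter_append, List.map_append]
  have hlast : (PySem.List.enumerate [x] (0 + (a.length : Int))).filter (pvCondB (a ++ [x]))
      = if List.count x a % 2 = 0 then [((a.length : Int), x)] else [] := by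
    have henum : PySem.List.enumerate [x] (0 + (a.length : Int)) = [((a.length : Int), x)] := by
      simp [PySem.List.enumerate_cons, PySem.List.enumerate_nil]
    rw [henum]
    have hdrop : (a ++ [x]).drop (a.length + 1) = [] := by
      simp
    rw [List.filter_cons]
    rw [pvCondB_eq (a ++ [x]) a.length x, hdrop]
    by_cases h : List.count x a % 2 = 0
    · have hp : (List.count x a + 1) % 2 = 1 := by omega
      simp [List.count_append, hp, h]
    · have hp : ¬ (List.count x a + 1) % 2 = 1 := by omega
      simp [List.count_append, hp, h]
  have hfirst : (PySem.List.enumerate a 0).filter (pvCondB (a ++ [x]))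
      = (PySem.List.enumerate a 0).filter (fun q => pvCondB a q && (q.2 != x)) := by
    apply List.filter_congr
    intro q hq
    obtain ⟨k, hk, rfl⟩ := (PySem.List.mem_enumerate_iff _ _ _).mp hq
    simp only [zero_add]
    have hd : (a ++ [x]).drop (k + 1) = a.drop (k + 1) ++ [x] :=
      pvDropAppend a [x] (k + 1) (by omega)
    rw [pvCondB_eq (a ++ [x]) k a[k], pvCondB_eq a k a[k], hd]
    by_cases hex : a[k] = x
    · simp [hex, List.count_append, List.mem_append]
    · have hc0 : List.count a[k] [x] = 0 := List.count_eq_zero.mpr (by simp [hex])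
      simp [List.count_append, hc0, hex, List.mem_append]
  rw [hfirst, hlast]
  have hmap : ((PySem.List.enumerate a 0).filter (fun q => pvCondB a q && (q.2 != x))).map Prod.snd
      = (((PySem.List.enumerate a 0).filter (pvCondB a)).map Prod.snd).filter (fun y => y != x) := by
    rw [List.filter_map, List.filter_filter]
    exact congrArg (List.map Prod.snd)
      (List.filter_congr (fun q _ => by simp [Function.comp, Bool.and_comm]))
  rw [hmap]
  by_cases h : List.count x a % 2 = 0 <;> simp [h]

lemma pvF_mem (a : List Int) (y : Int) : y ∈ pvF a ↔ List.count y a % 2 = 1 := by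
  induction a using List.reverseRecOn with
  | nil => simp [pvF, PySem.List.enumerate_nil]
  | append_singleton a x ih =>
    rw [pvF_step]
    by_cases hyx : y = x
    · subst hyx
      by_cases h : List.count y a % 2 = 0 <;>
        simp [h, List.mem_filter, List.count_append] <;> omega
    · have hcy : List.count y [x] = 0 := List.count_eq_zero.mpr (by simp [hyx])
      by_cases h : List.count x a % 2 = 0 <;>
        simp [h, List.mem_filter, List.count_append, hyx, ih, bne_iff_ne, hcy]

lemma pvF_nodup (a : List Int) : (pvF a).Nodup := by
  induction a using List.reverseRecOn with
  | nil => simp [pvF, PySem.List.enumerate_nil]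
  | append_singleton a x ih =>
    rw [pvF_step]
    by_cases h : List.count x a % 2 = 0
    · simp only [h, if_pos]
      apply List.Nodup.append (ih.filter _) (List.nodup_singleton x)
      intro y hy
      simp only [List.mem_filter, bne_iff_ne] at hy
      simp [hy.2]
    · simp only [h, if_neg, List.append_nil, not_false_iff]
      exact ih.filter _

lemma pvA_eq_pvF (a : List Int) : duplicator_locator_stack a = pvF a := by
  induction a using List.reverseRecOn with
  | nil => rfl
  | append_singleton a x ih =>
    unfold duplicator_locator_stack at ih ⊢
    rw [List.foldl_append, List.foldl_cons, List.foldl_nil, ih, pvF_step]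
    by_cases hx : x ∈ pvF a
    · have hodd : List.count x a % 2 = 1 := (pvF_mem a x).mp hx
      have hne : ¬ List.count x a % 2 = 0 := by omega
      simp only [hx, not_true, if_false, hne, List.append_nil]
      rw [PySem.List.remove?_eq_some_erase (pvF a) x hx, Option.getD_some]
      exact (pvF_nodup a).erase_eq_filter x
    · have heven : List.count x a % 2 = 0 := by
        have := (pvF_mem a x).not.mp hx
        omega
      have hfil : (pvF a).filter (fun y => y != x) = pvF a := by
        apply List.filter_eq_self.mpr
        intro y hy
        simp only [bne_iff_ne, ne_eq]
        intro h; exact hx (h ▸ hy)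
      simp only [hx, not_false_iff, if_pos, heven]
      rw [hfil]

-- ===== VERDICT (by name: the statement is the Claim_ definition above) =====
theorem duplicator_locator_stack_spec : Claim_equal_duplicator_locator_stack := by
  intro array _
  unfold Spec_duplicator_locator_stack
  rw [pvA_eq_pvF, pvAlt_eq_pvF]
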